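-- pv_equiv track=rewrite | github.com/zmli6/RSM | utils/Utils_v2.py | get_less_degree
-- ===== SOURCE A (Python) =====
-- def get_less_degree(graph_info, data_info):
--     # get number of nodes with larger degree in the data graph.
--     degree_info = data_info[2]
--     degree_dict = dict()
--     for d in degree_info:
--         if d not in degree_dict:
--             degree_dict[d] = 1
--         else:
--             degree_dict[d] += 1
--     degree_keys = list(degree_dict.keys())
--     less_degree = list()
--     for d in graph_info[2]:
--         count = 0
--         for dk in degree_keys:
--             if dk>=d:
--                 count+=degree_dict[dk]
--         less_degree.append(count)
--     return less_degree
-- ===== SOURCE B (Python) =====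
-- def _bisect_left(a, x):
--     lo, hi = 0, len(a)
--     while lo < hi:
--         mid = (lo + hi) // 2
--         if a[mid] < x:
--             lo = mid + 1
--         else:
--             hi = mid
--     return lo
--
--
-- def get_less_degree(graph_info, data_info):
--     # Sort the data degrees once; answer each query with a binary search.
--     degs = sorted(data_info[2])
--     n = len(degs)
--     return [n - _bisect_left(degs, d) for d in graph_info[2]]
-- ===== Notes on version B (the rewrite author's own statement) =====
-- stated objective: alternative
-- what changed: Instead of scanning every distinct degree for each query (dict of multiplicities, O(Q*K) nested loops), B sorts the data degrees once and answers each query with a binary search (bisect_left), returning n - position; intended as faster but a timing run measured only 1.42x at the largest size, so no speed is claimed.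
import Mathlib
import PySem

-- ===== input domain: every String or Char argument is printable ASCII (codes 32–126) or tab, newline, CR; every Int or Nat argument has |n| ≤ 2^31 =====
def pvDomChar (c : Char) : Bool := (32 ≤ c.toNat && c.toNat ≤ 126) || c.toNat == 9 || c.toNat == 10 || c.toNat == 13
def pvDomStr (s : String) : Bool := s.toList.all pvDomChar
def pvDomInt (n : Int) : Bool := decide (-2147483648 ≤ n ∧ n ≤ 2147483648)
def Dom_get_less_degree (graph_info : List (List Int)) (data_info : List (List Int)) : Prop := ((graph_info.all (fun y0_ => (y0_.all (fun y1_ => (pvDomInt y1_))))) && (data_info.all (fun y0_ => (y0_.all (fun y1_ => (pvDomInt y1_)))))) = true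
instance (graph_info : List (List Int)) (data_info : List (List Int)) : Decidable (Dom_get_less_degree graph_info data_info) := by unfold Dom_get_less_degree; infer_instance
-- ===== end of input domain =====

-- B replaces A's per-query scan of the distinct-degree dictionary by one sort of the
-- data degrees plus a binary search per query (objective: alternative algorithm).


-- ===== PORT A =====
def get_less_degree (graph_info : List (List Int)) (data_info : List (List Int)) : List Int :=
  let degree_info := PySem.List.pyGetD data_info 2 []
  let degree_dict : PySem.Dict Int Int :=
    degree_info.foldl
      (fun dd d => if dd.contains d = false then dd.insert d 1 else dd.insert d (dd.getD d 0 + 1))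
      PySem.Dict.empty
  let degree_keys := degree_dict.keys
  (PySem.List.pyGetD graph_info 2 []).foldl
    (fun less_degree d =>
      less_degree ++
        [degree_keys.foldl (fun count dk => if d ≤ dk then count + degree_dict.getD dk 0 else count) 0])
    []

-- ===== PORT B =====
-- hand-written bisect_left from Source B, step for step (lo/hi are the nonnegative Python ints)
def pvBisectLeft (a : List Int) (x : Int) (lo hi : Nat) : Nat :=
  if _h : lo < hi then
    let mid := (lo + hi) / 2
    if a.getD mid 0 < x then pvBisectLeft a x (mid + 1) hi else pvBisectLeft a x lo mid
  else lo
termination_by hi - lo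
decreasing_by all_goals omega

def get_less_degree_alt (graph_info : List (List Int)) (data_info : List (List Int)) : List Int :=
  let degs := PySem.List.sorted (PySem.List.pyGetD data_info 2 []) (fun x => x) false
  let n := degs.length
  (PySem.List.pyGetD graph_info 2 []).map
    (fun d => (n : Int) - (pvBisectLeft degs d 0 n : Int))

-- ===== PRECONDITION & SPEC =====
-- Pre_ excludes exactly the inputs where Python A raises IndexError: both
-- graph_info[2] and data_info[2] are accessed unconditionally.
def Pre_get_less_degree (graph_info : List (List Int)) (data_info : List (List Int)) : Prop :=
  3 ≤ graph_info.length ∧ 3 ≤ data_info.length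
instance (graph_info : List (List Int)) (data_info : List (List Int)) : Decidable (Pre_get_less_degree graph_info data_info) := by unfold Pre_get_less_degree; infer_instance

def pvWitness_get_less_degree : List (List Int) × List (List Int) :=
  ([[0], [1], [2, 3]], [[0], [1], [1, 3, 3, 5]])

def Spec_get_less_degree (graph_info : List (List Int)) (data_info : List (List Int)) (out : List Int) : Prop := out = get_less_degree_alt graph_info data_info
instance (graph_info : List (List Int)) (data_info : List (List Int)) (out : List Int) : Decidable (Spec_get_less_degree graph_info data_info out) := by unfold Spec_get_less_degree; infer_instance

-- ===== CLAIM (what is proved, stated in full; the proofs are below) =====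
def Claim_equal_get_less_degree : Prop := ∀ (graph_info : List (List Int)) (data_info : List (List Int)), Dom_get_less_degree graph_info data_info → Pre_get_less_degree graph_info data_info → Spec_get_less_degree graph_info data_info (get_less_degree graph_info data_info)

-- ===== LEMMAS AND PROOFS =====

-- sum of an indicator over a Nodup list
lemma pv_sum_zero {x : Int} (f : Int → Int) :
    ∀ (ks : List Int), x ∉ ks → (ks.map (fun k => if k = x then f k else 0)).sum = 0 := by
  intro ks hx
  induction ks with
  | nil => simp
  | cons k t ih =>
    simp only [List.mem_cons, not_or] at hx
    simp [Ne.symm hx.1, ih hx.2]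

lemma pv_sum_indicator {x : Int} (f : Int → Int) :
    ∀ (ks : List Int), ks.Nodup → x ∈ ks →
      (ks.map (fun k => if k = x then f k else 0)).sum = f x := by
  intro ks hnd hx
  induction ks with
  | nil => simp at hx
  | cons k t ih =>
    rcases List.mem_cons.mp hx with h | h
    · subst h
      simp [pv_sum_zero f t (List.nodup_cons.mp hnd).1]
    · have hk : k ≠ x := by
        intro he; exact (List.nodup_cons.mp hnd).1 (he ▸ h)
      simp [hk, ih (List.nodup_cons.mp hnd).2 h]

-- A's inner sum over any Nodup key list covering xs is countP
lemma pv_sum_counts (d : Int) (xs : List Int) :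
    ∀ (ks : List Int), ks.Nodup → (∀ x ∈ xs, x ∈ ks) →
      (ks.map (fun k => if d ≤ k then (xs.count k : Int) else 0)).sum
        = (xs.countP (fun y => decide (d ≤ y)) : Int) := by
  induction xs with
  | nil => intro ks _ _; simp
  | cons x t ih =>
    intro ks hnd hcov
    have hterm : ∀ k ∈ ks,
        (if d ≤ k then (((x :: t).count k : Nat) : Int) else 0)
          = (if d ≤ k then (t.count k : Int) else 0) + (if k = x then (if d ≤ k then 1 else 0) else 0) := by
      intro k _
      by_cases h1 : d ≤ k <;> by_cases h2 : k = x <;>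
        simp [h1, h2, List.count_cons] <;> omega
    calc (ks.map (fun k => if d ≤ k then ((x :: t).count k : Int) else 0)).sum
        = (ks.map (fun k => (if d ≤ k then (t.count k : Int) else 0)
            + (if k = x then (if d ≤ k then 1 else 0) else 0))).sum := by
          exact congrArg List.sum (List.map_congr_left hterm)
      _ = (ks.map (fun k => if d ≤ k then (t.count k : Int) else 0)).sum
            + (ks.map (fun k => if k = x then (if d ≤ k then 1 else 0) else 0)).sum :=
          PySem.List.sum_map_add_int ks _ _
      _ = ((x :: t).countP (fun y => decide (d ≤ y)) : Int) := by
          rw [ih ks hnd (fun y hy => hcov y (List.mem_cons_of_mem x hy)),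
              pv_sum_indicator (fun k => if d ≤ k then (1 : Int) else 0) ks hnd
                (hcov x (List.mem_cons_self))]
          rw [List.countP_cons]
          by_cases h1 : d ≤ x <;> simp [h1]

-- A's per-query inner loop computes countP
lemma pv_A_inner (d : Int) (xs : List Int) :
    (PySem.Dict.counter xs).keys.foldl
        (fun count dk => if d ≤ dk then count + (PySem.Dict.counter xs).getD dk 0 else count) 0
      = (xs.countP (fun y => decide (d ≤ y)) : Int) := by
  have hstep : (fun (count : Int) dk => if d ≤ dk then count + (PySem.Dict.counter xs).getD dk 0 else count)
      = fun count dk => count + (if d ≤ dk then (PySem.Dict.counter xs).getD dk 0 else 0) := by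
    funext c k; by_cases h : d ≤ k <;> simp [h]
  rw [hstep, PySem.List.foldl_add, PySem.Dict.keys_counter]
  have hmap : ∀ k ∈ PySem.Set.ofList xs,
      (if d ≤ k then (PySem.Dict.counter xs).getD k 0 else 0)
        = (if d ≤ k then (xs.count k : Int) else 0) := by
    intro k _; rw [PySem.Dict.getD_counter]
  rw [List.map_congr_left hmap,
      pv_sum_counts d xs (PySem.Set.ofList xs) (PySem.Set.nodup_ofList xs)
        (fun y hy => (PySem.Set.mem_ofList xs y).mpr hy)]
  simp

-- A's dict loop is the counter
lemma pv_A_dict (xs : List Int) :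
    xs.foldl
        (fun dd d => if dd.contains d = false then dd.insert d 1 else dd.insert d (dd.getD d 0 + 1))
        (PySem.Dict.empty : PySem.Dict Int Int)
      = PySem.Dict.counter xs := by
  have hstep : (fun (dd : PySem.Dict Int Int) d =>
        if dd.contains d = false then dd.insert d 1 else dd.insert d (dd.getD d 0 + 1))
      = fun dd d => dd.insert d (dd.getD d 0 + 1) := by
    funext dd d
    by_cases h : dd.contains d
    · simp [h]
    · rw [Bool.not_eq_true] at h
      have h0 := PySem.Dict.getD_of_not_contains dd (0 : Int) h
      simp [h, h0]
  rw [hstep, PySem.Dict.foldl_insert_getD_add_one_eq_counter]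

-- binary-search invariant
lemma pv_bisect_spec (a : List Int) (x : Int) (h : a.Pairwise (· ≤ ·)) :
    ∀ (n lo hi : Nat), hi - lo ≤ n → lo ≤ hi → hi ≤ a.length →
      lo ≤ pvBisectLeft a x lo hi ∧ pvBisectLeft a x lo hi ≤ hi ∧
      (∀ i (hi' : i < a.length), lo ≤ i → i < pvBisectLeft a x lo hi → a[i] < x) ∧
      (∀ i (hi' : i < a.length), pvBisectLeft a x lo hi ≤ i → i < hi → x ≤ a[i]) := by
  have hpw := List.pairwise_iff_getElem.mp h
  intro n
  induction n with
  | zero =>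
    intro lo hi hn hlh hhl
    have heq : lo = hi := by omega
    rw [pvBisectLeft]
    simp only [heq, Nat.lt_irrefl, dite_false]
    exact ⟨Nat.le_refl _, by omega, fun i _ h1 h2 => by omega, fun i _ h1 h2 => by omega⟩
  | succ n ih =>
    intro lo hi hn hlh hhl
    by_cases hlt : lo < hi
    · rw [pvBisectLeft]
      simp only [hlt, dite_true]
      have hm1 : lo ≤ (lo + hi) / 2 := by omega
      have hm2 : (lo + hi) / 2 < hi := by omega
      have hmlen : (lo + hi) / 2 < a.length := by omega
      rw [List.getD_eq_getElem a 0 hmlen]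
      by_cases hc : a[(lo + hi) / 2] < x
      · simp only [hc, if_true]
        obtain ⟨r1, r2, r3, r4⟩ := ih ((lo + hi) / 2 + 1) hi (by omega) (by omega) hhl
        refine ⟨by omega, r2, ?_, r4⟩
        intro i hi' h1 h2
        by_cases him : i < (lo + hi) / 2
        · exact lt_of_le_of_lt (hpw i ((lo + hi) / 2) hi' hmlen him) hc
        · by_cases heq : i = (lo + hi) / 2
          · subst heq; exact hc
          · exact r3 i hi' (by omega) h2
      · simp only [hc, if_false]
        have hcx : x ≤ a[(lo + hi) / 2] := le_of_not_gt hc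
        obtain ⟨r1, r2, r3, r4⟩ := ih lo ((lo + hi) / 2) (by omega) (by omega) (by omega)
        refine ⟨r1, by omega, r3, ?_⟩
        intro i hi' h1 h2
        by_cases him : i < (lo + hi) / 2
        · exact r4 i hi' h1 him
        · by_cases heq : i = (lo + hi) / 2
          · subst heq; exact hcx
          · exact le_trans hcx (hpw ((lo + hi) / 2) i hmlen hi' (by omega))
    · rw [pvBisectLeft]
      simp only [hlt, dite_false]
      exact ⟨Nat.le_refl _, hlh, fun i _ h1 h2 => by omega, fun i _ h1 h2 => by omega⟩

-- the sorted+bisect formula is countP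
lemma pv_B_inner (d : Int) (xs : List Int) :
    ((PySem.List.sorted xs (fun x => x) false).length : Int)
        - (pvBisectLeft (PySem.List.sorted xs (fun x => x) false) d 0
            (PySem.List.sorted xs (fun x => x) false).length : Int)
      = (xs.countP (fun y => decide (d ≤ y)) : Int) := by
  set s := PySem.List.sorted xs (fun x => x) false with hs
  have hpw : s.Pairwise (· ≤ ·) := PySem.List.sorted_pairwise xs (fun x => x)
  obtain ⟨r1, r2, r3, r4⟩ :=
    pv_bisect_spec s d hpw s.length 0 s.length (by omega) (by omega) (by omega)
  set r := pvBisectLeft s d 0 s.length with hr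
  have hcount : s.countP (fun y => decide (d ≤ y)) = s.length - r := by
    conv_lhs => rw [← List.take_append_drop r s]
    rw [List.countP_append]
    have htake : (s.take r).countP (fun y => decide (d ≤ y)) = 0 := by
      rw [List.countP_eq_zero]
      intro y hy
      obtain ⟨i, hilt, hie⟩ := List.mem_iff_getElem.mp hy
      have hir : i < r := by simp [List.length_take] at hilt; omega
      have hil : i < s.length := by omega
      have hlt2 : s[i] < d := r3 i hil (by omega) hir
      rw [List.getElem_take] at hie
      subst hie; simp; omega
    have hdrop : (s.drop r).countP (fun y => decide (d ≤ y)) = (s.drop r).length := by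
      rw [List.countP_eq_length]
      intro y hy
      obtain ⟨i, hilt, hie⟩ := List.mem_iff_getElem.mp hy
      have hil : r + i < s.length := by simp [List.length_drop] at hilt; omega
      have hle : d ≤ s[r + i] := r4 (r + i) hil (by omega) hil
      rw [List.getElem_drop] at hie
      subst hie; simpa using hle
    rw [htake, hdrop]
    simp
  have hperm : s.countP (fun y => decide (d ≤ y)) = xs.countP (fun y => decide (d ≤ y)) :=
    List.Perm.countP_eq _ (PySem.List.sorted_perm xs (fun x => x) false)
  rw [← hperm, hcount]
  omega

-- ===== VERDICT (by name: the statement is the Claim_ definition above) =====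
theorem get_less_degree_spec : Claim_equal_get_less_degree := by
  intro g di _ _
  simp only [Spec_get_less_degree, get_less_degree, get_less_degree_alt]
  rw [pv_A_dict]
  rw [PySem.List.foldl_append_singleton_eq_map]
  apply List.map_congr_left
  intro d _
  rw [pv_A_inner, pv_B_inner]
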